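-- pv_equiv track=rewrite | github.com/ShaderLight/multi-bin-converter | modules/conv.py | bin_add_one_lsb
-- ===== SOURCE A (Python) =====
-- def bin_add_one_lsb(x):
--     sep_index = ['.', x.find('.')]
--
--     if sep_index[1] == -1:
--         sep_index = [',', x.find(',')]
--
--     for i in range(len(x)):
--         if x[len(x) - i - 1] == '0':
--             output = x[:len(x) - i - 1] + '1' + '0' * len(x[len(x) - i:])
--
--             if sep_index[1] >= 0:
--                 output = output[:sep_index[1]] + sep_index[0] + output[sep_index[1] + 1:]
--
--             return output
--
--     raise OverflowError
-- ===== SOURCE B (Python) =====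
-- def bin_add_one_lsb(x):
--     sep_pos = x.find('.')
--     if sep_pos == -1:
--         sep_pos = x.find(',')
--     out = []
--     carry = True
--     for i in range(len(x) - 1, -1, -1):
--         c = x[i]
--         if i == sep_pos:
--             out.append(c)
--         elif carry and c == '0':
--             out.append('1')
--             carry = False
--         elif carry:
--             out.append('0')
--         else:
--             out.append(c)
--     if carry:
--         raise OverflowError
--     return ''.join(reversed(out))
-- ===== Notes on version B (the rewrite author's own statement) =====
-- stated objective: alternative
-- what changed: Replaces A's find-rightmost-zero-then-bulk-slice-and-patch construction with a single right-to-left carry-propagating pass that builds the output character by character.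
import Mathlib
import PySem

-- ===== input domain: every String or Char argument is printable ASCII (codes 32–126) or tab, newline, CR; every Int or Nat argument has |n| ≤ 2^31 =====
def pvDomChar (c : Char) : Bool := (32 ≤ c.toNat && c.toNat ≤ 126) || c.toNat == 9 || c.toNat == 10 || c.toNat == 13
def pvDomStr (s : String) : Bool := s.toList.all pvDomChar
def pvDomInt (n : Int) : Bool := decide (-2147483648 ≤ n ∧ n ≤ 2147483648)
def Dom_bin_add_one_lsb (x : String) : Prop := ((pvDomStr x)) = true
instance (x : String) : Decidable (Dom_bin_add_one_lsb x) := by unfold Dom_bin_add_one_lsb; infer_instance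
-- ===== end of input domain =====

-- B replaces A's find-rightmost-zero-then-slice-and-patch construction by a single
-- right-to-left carry-propagating pass (objective: alternative, same cost).

-- ===== PORT A =====
-- the 'for i in range(len(x))' loop of A, started at i; none = fell through (OverflowError)
def pvA_loop (cs : List Char) (sepC : Char) (sepIdx : Int) (i : Nat) : Option (List Char) :=
  if i < cs.length then
    if PySem.List.pyGet? cs ((cs.length : Int) - (i : Int) - 1) = some '0' then
      let output := PySem.List.slice cs none (some ((cs.length : Int) - (i : Int) - 1))
        ++ ['1']
        ++ List.replicate (PySem.List.slice cs (some ((cs.length : Int) - (i : Int))) none).length '0'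
      let output := if sepIdx ≥ 0 then
          PySem.List.slice output none (some sepIdx) ++ [sepC]
            ++ PySem.List.slice output (some (sepIdx + 1)) none
        else output
      some output
    else pvA_loop cs sepC sepIdx (i + 1)
  else none
termination_by cs.length - i

def bin_add_one_lsb (x : String) : String :=
  let cs := x.toList
  let sep : Char × Int :=
    if PySem.Chars.find cs ['.'] = -1 then (',', PySem.Chars.find cs [','])
    else ('.', PySem.Chars.find cs ['.'])
  String.ofList ((pvA_loop cs sep.1 sep.2 0).getD [])   -- none = A raises OverflowError (excluded by Pre_)

-- ===== PORT B =====
-- the 'for i in range(len(x)-1, -1, -1)' loop of B: counter k means current index i = k-1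
def pvB_loop (cs : List Char) (sep : Int) : Nat → List Char → Bool → List Char × Bool
  | 0, out, carry => (out, carry)
  | (k + 1), out, carry =>
      let c := cs.getD k ' '
      if (k : Int) = sep then pvB_loop cs sep k (out ++ [c]) carry
      else if carry && c = '0' then pvB_loop cs sep k (out ++ ['1']) false
      else if carry then pvB_loop cs sep k (out ++ ['0']) carry
      else pvB_loop cs sep k (out ++ [c]) carry

def bin_add_one_lsb_alt (x : String) : String :=
  let cs := x.toList
  let sep : Int :=
    if PySem.Chars.find cs ['.'] = -1 then PySem.Chars.find cs [',']
    else PySem.Chars.find cs ['.']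
  let res := pvB_loop cs sep cs.length [] true
  if res.2 then "" else String.ofList res.1.reverse   -- carry left = B raises OverflowError (excluded by Pre_)

-- ===== PRECONDITION & SPEC =====
-- A (and B) raise OverflowError exactly when x contains no zero digit; those inputs are excluded.
def Pre_bin_add_one_lsb (x : String) : Prop := '0' ∈ x.toList
instance (x : String) : Decidable (Pre_bin_add_one_lsb x) := by unfold Pre_bin_add_one_lsb; infer_instance

def pvWitness_bin_add_one_lsb : String := "10.01"

def Spec_bin_add_one_lsb (x : String) (out : String) : Prop := out = bin_add_one_lsb_alt x
instance (x : String) (out : String) : Decidable (Spec_bin_add_one_lsb x out) := by unfold Spec_bin_add_one_lsb; infer_instance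

-- ===== CLAIM (what is proved, stated in full; the proofs are below) =====
def Claim_equal_bin_add_one_lsb : Prop := ∀ (x : String), Dom_bin_add_one_lsb x → Pre_bin_add_one_lsb x → Spec_bin_add_one_lsb x (bin_add_one_lsb x)

-- ===== LEMMAS AND PROOFS =====

-- rightmost-occurrence decomposition
theorem pv_last_mem_split {α : Type} [DecidableEq α] {a : α} {xs : List α} (h : a ∈ xs) :
    ∃ l r, xs = l ++ a :: r ∧ a ∉ r := by
  induction xs using List.reverseRecOn with
  | nil => cases h
  | append_singleton ys y ih =>
      by_cases hy : y = a
      · exact ⟨ys, [], by simp [hy], by simp⟩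
      · have hm : a ∈ ys := by
          rcases List.mem_append.1 h with h' | h'
          · exact h'
          · simp at h'; exact absurd h'.symm hy
        obtain ⟨l, r, hsplit, hr⟩ := ih hm
        exact ⟨l, r ++ [y], by simp [hsplit], by simp [hr]; exact fun h => hy h.symm⟩

-- processed char of B's carry region at absolute index j
def pvH (cs : List Char) (s : Int) (j : Nat) : Char :=
  if (j : Int) = s then cs.getD j ' ' else '0'

-- B's loop once the carry is cleared: copies the remaining prefix, reversed
theorem pvB_loop_nocarry (cs : List Char) (s : Int) :
    ∀ k, k ≤ cs.length → ∀ out, pvB_loop cs s k out false = (out ++ (cs.take k).reverse, false) := by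
  intro k
  induction k with
  | zero => intro _ out; simp [pvB_loop]
  | succ k ih =>
      intro hk out
      have hk' : k < cs.length := by omega
      have hc : cs.getD k ' ' = cs[k] := List.getD_eq_getElem cs ' ' hk'
      have htake : (cs.take (k+1)).reverse = cs[k] :: (cs.take k).reverse := by
        rw [List.take_add_one]; simp [List.getElem?_eq_getElem hk']
      rw [pvB_loop]
      simp only [Bool.false_and, Bool.false_eq_true, if_false, hc]
      split_ifs <;> rw [ih (by omega)] <;> simp [htake]

-- B's loop while the carry is set, above the rightmost '0' at index l.length
theorem pvB_loop_carry (l r : List Char) (s : Int) (hr : '0' ∉ r)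
    (hps : ((l.length : Nat) : Int) ≠ s) :
    ∀ d, d ≤ r.length → ∀ out,
      pvB_loop (l ++ '0' :: r) s (l.length + 1 + d) out true =
        (out ++ ((List.range' (l.length + 1) d).map (pvH (l ++ '0' :: r) s)).reverse
          ++ ['1'] ++ l.reverse, false) := by
  intro d
  induction d with
  | zero =>
      intro _ out
      have hlen : l.length < (l ++ '0' :: r).length := by simp
      have hg : (l ++ '0' :: r).getD l.length ' ' = '0' := by
        rw [List.getD_eq_getElem _ ' ' hlen, List.getElem_append_right (by omega)]
        simp
      rw [show l.length + 1 + 0 = l.length + 1 from rfl, pvB_loop]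
      simp only [hg, if_neg hps]
      norm_num
      rw [pvB_loop_nocarry _ _ _ (by simp) _]
      simp
  | succ d ih =>
      intro hd out
      have hlen : l.length + 1 + d < (l ++ '0' :: r).length := by simp; omega
      have hg : (l ++ '0' :: r).getD (l.length + 1 + d) ' ' = r[d]'(by omega) := by
        rw [List.getD_eq_getElem _ ' ' hlen, List.getElem_append_right (by omega)]
        simp [show l.length + 1 + d - l.length = d + 1 from by omega]
      have hne : r[d]'(by omega) ≠ '0' := fun h => hr (h ▸ List.getElem_mem _)
      have hrange : List.range' (l.length + 1) (d + 1)
          = List.range' (l.length + 1) d ++ [l.length + 1 + d] := by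
        rw [List.range'_concat]; norm_num
      rw [show l.length + 1 + (d + 1) = (l.length + 1 + d) + 1 from by omega, pvB_loop]
      simp only [hg]
      by_cases hs : ((l.length + 1 + d : Nat) : Int) = s
      · rw [if_pos hs, ih (by omega)]
        have hH : pvH (l ++ '0' :: r) s (l.length + 1 + d) = r[d]'(by omega) := by
          simp only [pvH, if_pos hs]; exact hg
        rw [hrange, List.map_append, List.reverse_append]
        simp [hH]
      · rw [if_neg hs, if_neg (by simp [hne]), if_pos trivial, ih (by omega)]
        have hH : pvH (l ++ '0' :: r) s (l.length + 1 + d) = '0' := by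
          simp only [pvH, if_neg hs]
        rw [hrange, List.map_append, List.reverse_append]
        simp [hH]

-- A's loop skips every index above the rightmost '0'
theorem pvA_loop_skip (l r : List Char) (c : Char) (s : Int) (hr : '0' ∉ r) :
    ∀ d i, i + d = r.length →
      pvA_loop (l ++ '0' :: r) c s i = pvA_loop (l ++ '0' :: r) c s r.length := by
  intro d
  induction d with
  | zero => intro i hi; rw [show i = r.length from by omega]
  | succ d ih =>
      intro i hi
      have hlen : i < (l ++ '0' :: r).length := by simp; omega
      have hcast : ((l ++ '0' :: r).length : Int) - (i : Int) - 1
          = ((l.length + 1 + (r.length - i - 1) : Nat) : Int) := by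
        simp only [List.length_append, List.length_cons]; omega
      have hget : PySem.List.pyGet? (l ++ '0' :: r) ((l.length + 1 + (r.length - i - 1) : Nat) : Int)
          = some (r[r.length - i - 1]'(by omega)) := by
        rw [PySem.List.pyGet?_natCast, List.getElem?_append_right (by omega)]
        simp [show l.length + 1 + (r.length - i - 1) - l.length = (r.length - i - 1) + 1 from by omega,
          List.getElem?_eq_getElem (show r.length - i - 1 < r.length from by omega)]
      rw [pvA_loop, if_pos hlen, hcast, hget,
        if_neg (by simp; exact fun h => hr (h ▸ List.getElem_mem _))]
      exact ih (i + 1) (by omega)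

-- A's loop fires at the rightmost '0'
theorem pvA_loop_fire (l r : List Char) (c : Char) (s : Int) :
    pvA_loop (l ++ '0' :: r) c s r.length =
      some (if s ≥ 0 then
          PySem.List.slice (l ++ '1' :: List.replicate r.length '0') none (some s) ++ [c]
            ++ PySem.List.slice (l ++ '1' :: List.replicate r.length '0') (some (s + 1)) none
        else l ++ '1' :: List.replicate r.length '0') := by
  have hlen : r.length < (l ++ '0' :: r).length := by simp; omega
  have hcast1 : ((l ++ '0' :: r).length : Int) - (r.length : Int) - 1 = ((l.length : Nat) : Int) := by
    simp only [List.length_append, List.length_cons]; omega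
  have hget : PySem.List.pyGet? (l ++ '0' :: r) ((l.length : Nat) : Int) = some '0' := by
    rw [PySem.List.pyGet?_natCast, List.getElem?_append_right le_rfl]; simp
  have hcast2 : ((l ++ '0' :: r).length : Int) - (r.length : Int) = ((l.length + 1 : Nat) : Int) := by
    simp only [List.length_append, List.length_cons]; omega
  have hsl1 : PySem.List.slice (l ++ '0' :: r) none (some ((l.length : Nat) : Int)) = l := by
    rw [PySem.List.slice_to_natCast]; exact List.take_left
  have hsl2 : PySem.List.slice (l ++ '0' :: r) (some ((l.length + 1 : Nat) : Int)) none = r := by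
    rw [PySem.List.slice_from_natCast, show l ++ '0' :: r = (l ++ ['0']) ++ r from by simp,
      show l.length + 1 = (l ++ ['0']).length from by simp]
    exact List.drop_left
  rw [pvA_loop, if_pos hlen, hcast1, hget, if_pos rfl, hcast2, hsl1, hsl2]
  simp

-- the core equality: A's slice-and-patch output is B's carry-region output
theorem pv_out_eq (l r : List Char) (_hr : '0' ∉ r) (c : Char) (s : Int)
    (hfacts : 0 ≤ s → ∃ q : Nat, (q : Int) = s ∧ q < (l ++ '0' :: r).length ∧
      (l ++ '0' :: r).getD q ' ' = c ∧ c ≠ '0') :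
    (if s ≥ 0 then
        PySem.List.slice (l ++ '1' :: List.replicate r.length '0') none (some s) ++ [c]
          ++ PySem.List.slice (l ++ '1' :: List.replicate r.length '0') (some (s + 1)) none
      else l ++ '1' :: List.replicate r.length '0')
    = l ++ '1' :: (List.range' (l.length + 1) r.length).map (pvH (l ++ '0' :: r) s) := by
  by_cases hs : s ≥ 0
  · obtain ⟨q, hq, hqn, hcq, hc0⟩ := hfacts hs
    have hqn' : q < l.length + (r.length + 1) := by simpa using hqn
    have hp0 : (l ++ '0' :: r).getD l.length ' ' = '0' := by
      rw [List.getD_eq_getElem _ ' ' (by simp), List.getElem_append_right le_rfl]; simp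
    have hqp : q ≠ l.length := fun h => hc0 (by rw [← hcq, h, hp0])
    have hcq' : (l ++ '0' :: r)[q]'hqn = c := by
      rw [← List.getD_eq_getElem _ ' ' hqn]; exact hcq
    rw [if_pos hs]
    have hsl1 : PySem.List.slice (l ++ '1' :: List.replicate r.length '0') none (some s)
        = (l ++ '1' :: List.replicate r.length '0').take q := by
      rw [← hq, PySem.List.slice_to_natCast]
    have hsl2 : PySem.List.slice (l ++ '1' :: List.replicate r.length '0') (some (s + 1)) none
        = (l ++ '1' :: List.replicate r.length '0').drop (q + 1) := by
      rw [show s + 1 = ((q + 1 : Nat) : Int) from by push_cast; omega, PySem.List.slice_from_natCast]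
    have hset : (l ++ '1' :: List.replicate r.length '0').set q c
        = (l ++ '1' :: List.replicate r.length '0').take q ++ [c]
          ++ (l ++ '1' :: List.replicate r.length '0').drop (q + 1) := by
      rw [List.set_eq_take_append_cons_drop,
        if_pos (by simp; omega : q < (l ++ '1' :: List.replicate r.length '0').length)]
      simp
    rw [hsl1, hsl2, ← hset]
    apply List.ext_getElem
    · simp
    · intro j h1 h2
      rw [List.getElem_set]
      by_cases hj : j < l.length
      · split_ifs with hqj
        · subst hqj
          rw [← hcq', List.getElem_append_left hj, List.getElem_append_left hj]
        · rw [List.getElem_append_left hj, List.getElem_append_left hj]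
      · by_cases hj2 : j = l.length
        · subst hj2
          rw [if_neg hqp,
            List.getElem_append_right (le_refl l.length),
            List.getElem_append_right (le_refl l.length)]
          simp
        · have hjlen : j < l.length + 1 + r.length := by
            have h2' := h2; simp at h2'; omega
          have hRHS : (l ++ '1' :: (List.range' (l.length + 1) r.length).map
                (pvH (l ++ '0' :: r) s))[j]'h2
              = pvH (l ++ '0' :: r) s j := by
            rw [List.getElem_append_right (by omega)]
            obtain ⟨m, hm⟩ : ∃ m, j - l.length = m + 1 := ⟨j - l.length - 1, by omega⟩
            simp only [hm, List.getElem_cons_succ, List.getElem_map, List.getElem_range']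
            congr 1
            omega
          rw [hRHS]
          split_ifs with hqj
          · subst hqj
            simp only [pvH, if_pos hq]
            exact hcq.symm
          · have hns : ¬ ((j : Int) = s) := fun hjs => hqj (by omega)
            rw [List.getElem_append_right (by omega : l.length ≤ j)]
            obtain ⟨m, hm⟩ : ∃ m, j - l.length = m + 1 := ⟨j - l.length - 1, by omega⟩
            simp only [hm, List.getElem_cons_succ, List.getElem_replicate]
            simp only [pvH, if_neg hns]
  · rw [if_neg hs]
    have hrep : (List.range' (l.length + 1) r.length).map (pvH (l ++ '0' :: r) s)
        = List.replicate r.length '0' := by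
      rw [List.eq_replicate_iff]
      refine ⟨by simp, ?_⟩
      intro b hb
      obtain ⟨k, hk, rfl⟩ := List.mem_map.1 hb
      have hns : ¬ ((k : Int) = s) := by omega
      simp only [pvH, if_neg hns]
    rw [hrep]

-- a non-negative find result is an in-range index holding the searched character
theorem pv_find_facts (cs : List Char) (a : Char) (h : 0 ≤ PySem.Chars.find cs [a]) :
    ∃ q : Nat, (q : Int) = PySem.Chars.find cs [a] ∧ q < cs.length ∧ cs.getD q ' ' = a := by
  obtain ⟨hpref, -⟩ := PySem.Chars.find_spec h
  obtain ⟨t, ht⟩ := hpref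
  have hget : cs[(PySem.Chars.find cs [a]).toNat + 0]? = some a := by
    rw [← List.getElem?_drop, ← ht]; simp
  have hlt : (PySem.Chars.find cs [a]).toNat < cs.length := by
    by_contra hlen
    rw [List.drop_eq_nil_of_le (by omega)] at ht
    simp at ht
  refine ⟨(PySem.Chars.find cs [a]).toNat, Int.toNat_of_nonneg h, hlt, ?_⟩
  rw [List.getD_eq_getElem _ ' ' hlt]
  have hget' : cs[(PySem.Chars.find cs [a]).toNat]? = some a := by simpa using hget
  rw [List.getElem?_eq_getElem hlt] at hget'
  exact Option.some_inj.mp hget'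

-- the two ports agree on any string with a rightmost '0'
theorem pv_core (cs l r : List Char) (hcs : cs = l ++ '0' :: r) (hr : '0' ∉ r) (c : Char) (s : Int)
    (hfacts : 0 ≤ s → ∃ q : Nat, (q : Int) = s ∧ q < cs.length ∧ cs.getD q ' ' = c ∧ c ≠ '0') :
    String.ofList ((pvA_loop cs c s 0).getD [])
      = (if (pvB_loop cs s cs.length [] true).2 then ""
         else String.ofList (pvB_loop cs s cs.length [] true).1.reverse) := by
  subst hcs
  have hps : ((l.length : Nat) : Int) ≠ s := by
    intro hps
    obtain ⟨q, hq, hqn, hcq, hc0⟩ := hfacts (hps ▸ Int.natCast_nonneg _)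
    have hql : q = l.length := by omega
    subst hql
    apply hc0
    rw [← hcq, List.getD_eq_getElem _ ' ' hqn, List.getElem_append_right le_rfl]
    simp
  rw [pvA_loop_skip l r c s hr r.length 0 (by omega), pvA_loop_fire,
    show (l ++ '0' :: r).length = l.length + 1 + r.length from by simp; omega,
    pvB_loop_carry l r s hr hps r.length le_rfl []]
  simp only [Option.getD_some]
  rw [pv_out_eq l r hr c s hfacts]
  simp only [Bool.false_eq_true, if_false]
  congr 1
  simp [List.reverse_append]

theorem bin_add_one_lsb_spec : Claim_equal_bin_add_one_lsb := by
  intro x _ hpre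
  unfold Spec_bin_add_one_lsb
  obtain ⟨l, r, hsplit, hr⟩ := pv_last_mem_split hpre
  simp only [bin_add_one_lsb, bin_add_one_lsb_alt]
  by_cases hf : PySem.Chars.find x.toList ['.'] = -1
  · rw [if_pos hf, if_pos hf]
    refine pv_core x.toList l r hsplit hr ',' _ ?_
    intro h0
    obtain ⟨q, hq, hqn, hcq⟩ := pv_find_facts x.toList ',' h0
    exact ⟨q, hq, hqn, hcq, by decide⟩
  · rw [if_neg hf, if_neg hf]
    refine pv_core x.toList l r hsplit hr '.' _ ?_
    intro h0
    obtain ⟨q, hq, hqn, hcq⟩ := pv_find_facts x.toList '.' h0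
    exact ⟨q, hq, hqn, hcq, by decide⟩
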